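-- pv_equiv track=rewrite | github.com/anthonynguyen2021/NonLeetCode | SearchForRange/searchForRange.py | helperFindRange
-- ===== SOURCE A (Python) =====
-- def helperFindRange(array, target, goLeft):
--
-- 	firstIdx, lastIdx = -1, -1
-- 	left, right = 0, len(array) - 1
--
-- 	while left <= right:
--
-- 		mid = (left + right) // 2
--
-- 		if array[mid] == target:
-- 			if goLeft:
-- 				firstIdx = mid
-- 				right = mid - 1
-- 			else:
-- 				lastIdx = mid
-- 				left = mid + 1
-- 		elif array[mid] > target:
-- 			right = mid - 1
-- 		else:
-- 			left = mid + 1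
--
-- 	return firstIdx if goLeft else lastIdx
-- ===== SOURCE B (Python) =====
-- def helperFindRange(array, target, goLeft):
-- 	def search(left, right):
-- 		if left > right:
-- 			return -1
-- 		mid = (left + right) // 2
-- 		if array[mid] < target:
-- 			return search(mid + 1, right)
-- 		if array[mid] > target:
-- 			return search(left, mid - 1)
-- 		# match: prefer the result of the deeper search on the preferred side
-- 		deeper = search(left, mid - 1) if goLeft else search(mid + 1, right)
-- 		return mid if deeper == -1 else deeper
-- 	return search(0, len(array) - 1)
-- ===== Notes on version B (the rewrite author's own statement) =====
-- stated objective: alternative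
-- what changed: Replaces A's while loop with two mutable best-index variables by a pure divide-and-conquer helper that returns -1 for not-found and combines the recursive result after the call (no accumulator), with the comparison chain restructured (< , > , then match).
import Mathlib
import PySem

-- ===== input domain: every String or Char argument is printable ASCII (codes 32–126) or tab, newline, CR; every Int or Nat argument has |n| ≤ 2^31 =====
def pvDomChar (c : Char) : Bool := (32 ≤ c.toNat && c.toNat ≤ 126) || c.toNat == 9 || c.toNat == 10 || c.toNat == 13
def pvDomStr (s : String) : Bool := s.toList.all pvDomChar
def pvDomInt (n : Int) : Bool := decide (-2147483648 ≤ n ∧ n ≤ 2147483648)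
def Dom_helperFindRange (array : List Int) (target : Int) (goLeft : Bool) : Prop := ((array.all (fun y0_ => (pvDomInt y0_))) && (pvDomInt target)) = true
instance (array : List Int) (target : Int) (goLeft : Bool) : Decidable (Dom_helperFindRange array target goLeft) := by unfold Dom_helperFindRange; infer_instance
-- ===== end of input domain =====

-- B replaces A's while loop (two mutable best indices) by a pure divide-and-conquer
-- helper returning -1 for not-found and combining the recursive result after the call.


-- ===== PORT A =====
-- A's while loop, state (firstIdx, lastIdx, left, right); mid = (left+right)//2 and
-- v = array[mid] are written inline.  The Nat fuel only makes the recursion structural: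
-- each iteration shrinks right-left by at least 1, so array.length+1 steps always
-- suffice and the fuel-0 branch (same value as loop exit) is never taken from the
-- entry point.  array[mid] is always in range there, so the pyGetD default 0 is unused.
def helperFindRangeLoop (array : List Int) (target : Int) (goLeft : Bool)
    (firstIdx lastIdx left right : Int) : Nat → Int
  | 0 => if goLeft then firstIdx else lastIdx
  | fuel + 1 =>
    if left ≤ right then
      if PySem.List.pyGetD array (PySem.Int.floordiv (left + right) 2) 0 = target then
        if goLeft then
          helperFindRangeLoop array target goLeft (PySem.Int.floordiv (left + right) 2) lastIdx left (PySem.Int.floordiv (left + right) 2 - 1) fuel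
        else
          helperFindRangeLoop array target goLeft firstIdx (PySem.Int.floordiv (left + right) 2) (PySem.Int.floordiv (left + right) 2 + 1) right fuel
      else if PySem.List.pyGetD array (PySem.Int.floordiv (left + right) 2) 0 > target then
        helperFindRangeLoop array target goLeft firstIdx lastIdx left (PySem.Int.floordiv (left + right) 2 - 1) fuel
      else
        helperFindRangeLoop array target goLeft firstIdx lastIdx (PySem.Int.floordiv (left + right) 2 + 1) right fuel
    else
      if goLeft then firstIdx else lastIdx

def helperFindRange (array : List Int) (target : Int) (goLeft : Bool) : Int :=
  helperFindRangeLoop array target goLeft (-1) (-1) 0 ((array.length : Int) - 1) (array.length + 1)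

-- ===== PORT B =====
-- B's helper search(left, right): -1 means not found; on a match the result of the
-- deeper search on the preferred side wins, else mid itself (mid written inline).
-- Same structural fuel as the A-side port; fuel 0 returns the not-found value -1.
def findRangeSearch (array : List Int) (target : Int) (goLeft : Bool)
    (left right : Int) : Nat → Int
  | 0 => -1
  | fuel + 1 =>
    if left > right then -1
    else
      if PySem.List.pyGetD array (PySem.Int.floordiv (left + right) 2) 0 < target then
        findRangeSearch array target goLeft (PySem.Int.floordiv (left + right) 2 + 1) right fuel
      else if PySem.List.pyGetD array (PySem.Int.floordiv (left + right) 2) 0 > target then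
        findRangeSearch array target goLeft left (PySem.Int.floordiv (left + right) 2 - 1) fuel
      else
        if (if goLeft then findRangeSearch array target goLeft left (PySem.Int.floordiv (left + right) 2 - 1) fuel
            else findRangeSearch array target goLeft (PySem.Int.floordiv (left + right) 2 + 1) right fuel) = -1 then
          PySem.Int.floordiv (left + right) 2
        else
          (if goLeft then findRangeSearch array target goLeft left (PySem.Int.floordiv (left + right) 2 - 1) fuel
           else findRangeSearch array target goLeft (PySem.Int.floordiv (left + right) 2 + 1) right fuel)

def helperFindRange_alt (array : List Int) (target : Int) (goLeft : Bool) : Int :=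
  findRangeSearch array target goLeft 0 ((array.length : Int) - 1) (array.length + 1)

-- ===== PRECONDITION & SPEC =====
def Spec_helperFindRange (array : List Int) (target : Int) (goLeft : Bool) (out : Int) : Prop := out = helperFindRange_alt array target goLeft
instance (array : List Int) (target : Int) (goLeft : Bool) (out : Int) : Decidable (Spec_helperFindRange array target goLeft out) := by unfold Spec_helperFindRange; infer_instance

-- ===== CLAIM (what is proved, stated in full; the proofs are below) =====
def Claim_equal_helperFindRange : Prop := ∀ (array : List Int) (target : Int) (goLeft : Bool), Dom_helperFindRange array target goLeft → Spec_helperFindRange array target goLeft (helperFindRange array target goLeft)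

-- ===== LEMMAS AND PROOFS =====

-- A's loop carrying both best indices equals combining B's -1-style search result
-- with the carried best index (0 ≤ left, so every index B reports is ≥ 0, never -1).
-- Holds for EVERY fuel: at fuel 0 both sides give the carried best as well.
theorem loop_eq_search (array : List Int) (target : Int) (goLeft : Bool) :
    ∀ (fuel : Nat) (firstIdx lastIdx left right : Int), 0 ≤ left →
      helperFindRangeLoop array target goLeft firstIdx lastIdx left right fuel
        = (if findRangeSearch array target goLeft left right fuel = -1
           then (if goLeft then firstIdx else lastIdx)
           else findRangeSearch array target goLeft left right fuel) := by
  intro fuel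
  induction fuel with
  | zero => intro f l L R hL; simp [helperFindRangeLoop, findRangeSearch]
  | succ fuel ih =>
    intro f l L R hL
    rw [helperFindRangeLoop, findRangeSearch]
    by_cases h : L ≤ R
    · rw [if_pos h, if_neg (by omega : ¬ L > R)]
      have hb := PySem.Int.floordiv_two_mid_bounds (lo := L) (hi := R) h
      by_cases hv : PySem.List.pyGetD array (PySem.Int.floordiv (L + R) 2) 0 = target
      · rw [if_pos hv, if_neg (by omega : ¬ PySem.List.pyGetD array (PySem.Int.floordiv (L + R) 2) 0 < target),
          if_neg (by omega : ¬ PySem.List.pyGetD array (PySem.Int.floordiv (L + R) 2) 0 > target)]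
        cases goLeft with
        | true =>
            simp only [if_true]
            rw [ih _ _ _ _ hL, if_pos rfl]
            split_ifs <;> omega
        | false =>
            simp only [Bool.false_eq_true, if_false]
            rw [ih _ _ _ _ (by omega), if_neg (by decide : ¬ false = true)]
            split_ifs <;> omega
      · rw [if_neg hv]
        by_cases hgt : PySem.List.pyGetD array (PySem.Int.floordiv (L + R) 2) 0 > target
        · simp only [if_neg (by omega : ¬ PySem.List.pyGetD array (PySem.Int.floordiv (L + R) 2) 0 < target),
            if_pos hgt, ih _ _ _ _ hL]
        · simp only [if_pos (by omega : PySem.List.pyGetD array (PySem.Int.floordiv (L + R) 2) 0 < target),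
            if_neg hgt, ih _ _ _ _ (by omega : (0:Int) ≤ PySem.Int.floordiv (L + R) 2 + 1)]
    · rw [if_neg h, if_pos (by omega : L > R)]
      simp

-- ===== VERDICT (by name: the statement is the Claim_ definition above) =====
theorem helperFindRange_spec : Claim_equal_helperFindRange := by
  intro array target goLeft _
  unfold Spec_helperFindRange helperFindRange helperFindRange_alt
  rw [loop_eq_search _ _ _ _ _ _ _ _ (by omega)]
  split_ifs with hr <;> simp [hr]
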